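-- pv_equiv track=rewrite | github.com/yuppieghost/algorithm | basic_structure/31_bfs_dfs/graph_application.py | my_find_vertex_by_degree
-- ===== SOURCE A (Python) =====
-- from collections import deque
--
-- def my_find_vertex_by_degree(graph, s, degree):
--     if len(graph) <= 1:
--         return []
--     if degree == 0:
--         return [s]
--     prev = [None] * len(graph)
--     visited = [False] * len(graph)
--     q = deque()
--     q.append(s)
--     visited[s] = True
--     while q:
--         # 每层对应一度
--         for i in range(len(q)):
--             vertex = q.popleft()
--             for j in graph[vertex]:
--                 if not visited[j]:
--                     prev[j] = vertex
--                     visited[j] = True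
--                     q.append(j)
--         # 每层对应一度
--         degree -= 1
--         if degree == 0:
--             return list(q)
-- ===== SOURCE B (Python) =====
-- def my_find_vertex_by_degree(graph, s, degree):
--     if len(graph) <= 1:
--         return []
--     if degree == 0:
--         return [s]
--     # single flat BFS: label every reachable vertex with its distance in
--     # discovery order, then select the wanted distance afterwards
--     seen = {s}
--     labeled = [(s, 0)]
--     i = 0
--     while i < len(labeled):
--         v, d = labeled[i]
--         for j in graph[v]:
--             if j not in seen:
--                 seen.add(j)
--                 labeled.append((j, d + 1))
--         i += 1
--     return [v for v, d in labeled if d == degree]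
-- ===== Notes on version B (the rewrite author's own statement) =====
-- stated objective: alternative
-- what changed: A runs a level-synchronous BFS (deque, visited/prev arrays, an inner per-level loop and a countdown that early-returns the current frontier); B has no level structure at all: one flat queue walk labels each discovered vertex with its distance as a (vertex,dist) pair, and a final comprehension selects the vertices whose label equals the requested distance.
-- outside the precondition, e.g. on my_find_vertex_by_degree([[0], [2, 1], [2, 4, -2]], 1, 1): A returns [2], B raises IndexError; on my_find_vertex_by_degree([[], [1], [-1, 2, 4], [3]], -1, 1): A returns [], B returns [3]; on my_find_vertex_by_degree([[1], [0]], 0, 5): A returns None, B returns []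
import Mathlib
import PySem

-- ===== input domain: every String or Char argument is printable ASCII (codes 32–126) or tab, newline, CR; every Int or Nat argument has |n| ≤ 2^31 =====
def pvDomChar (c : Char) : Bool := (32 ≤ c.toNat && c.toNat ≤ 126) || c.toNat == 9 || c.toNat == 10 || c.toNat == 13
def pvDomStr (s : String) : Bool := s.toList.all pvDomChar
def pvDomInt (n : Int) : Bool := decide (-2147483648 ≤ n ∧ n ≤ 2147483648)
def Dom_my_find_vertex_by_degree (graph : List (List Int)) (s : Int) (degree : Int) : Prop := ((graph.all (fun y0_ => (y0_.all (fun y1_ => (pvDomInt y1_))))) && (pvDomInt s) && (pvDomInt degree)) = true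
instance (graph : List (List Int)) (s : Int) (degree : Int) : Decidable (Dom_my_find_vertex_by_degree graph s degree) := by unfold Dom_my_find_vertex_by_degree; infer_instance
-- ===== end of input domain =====

-- B replaces A's level-synchronous BFS (deque, visited/prev arrays, inner per-level loop, early
-- return on a countdown) by one flat queue walk that labels each discovered vertex with its
-- distance and then selects the wanted distance afterwards (objective: alternative decomposition).

-- ===== PORT A =====
-- inner 'for j in graph[vertex]' body; pyGetD/pySetD are exact on Pre_'s in-range indices
def pvInnerA (vertex : Int) (st : List Int × List Bool × List (Option Int)) (j : Int) :
    List Int × List Bool × List (Option Int) :=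
  if !(PySem.List.pyGetD st.2.1 j false) then
    (st.1 ++ [j], PySem.List.pySetD st.2.1 j true, PySem.List.pySetD st.2.2 j (some vertex))
  else st

-- one popped vertex: iterate its adjacency list graph[vertex]
def pvStepA (graph : List (List Int)) (st : List Int × List Bool × List (Option Int)) (vertex : Int) :
    List Int × List Bool × List (Option Int) :=
  (PySem.List.pyGetD graph vertex []).foldl (pvInnerA vertex) st

-- 'while q:' — one iteration pops the whole current level ('for i in range(len(q))') and appends
-- the next one; the fuel only makes the (terminating) Python loop structurally recursive and is
-- never exhausted under Pre_
def pvLoopA (graph : List (List Int)) :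
    Nat → List Int → List Bool → List (Option Int) → Int → List Int
  | 0, _, _, _, _ => []
  | fuel+1, q, visited, prev, degree =>
    if q = [] then []   -- Python falls out of the while and returns None; Pre_ excludes this
    else
      let st := q.foldl (pvStepA graph) ([], visited, prev)
      if degree - 1 = 0 then st.1
      else pvLoopA graph fuel st.1 st.2.1 st.2.2 (degree - 1)

def my_find_vertex_by_degree (graph : List (List Int)) (s : Int) (degree : Int) : List Int :=
  if graph.length ≤ 1 then []
  else if degree = 0 then [s]
  else pvLoopA graph (graph.length + 1) [s]
        (PySem.List.pySetD (List.replicate graph.length false) s true)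
        (List.replicate graph.length none) degree

-- ===== PORT B =====
-- 'if j not in seen: seen.add(j); labeled.append((j, d + 1))'
def pvLabInner (d : Int) (st : PySem.Set Int × List (Int × Int)) (j : Int) :
    PySem.Set Int × List (Int × Int) :=
  if PySem.Set.contains st.1 j then st else (PySem.Set.add st.1 j, st.2 ++ [(j, d + 1)])

-- 'while i < len(labeled): v, d = labeled[i]; for j in graph[v]: …; i += 1'; the fuel only makes
-- the (terminating) Python loop structurally recursive and is never exhausted under Pre_
def pvLoopFlat (graph : List (List Int)) :
    Nat → PySem.Set Int × List (Int × Int) → Nat → List (Int × Int)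
  | 0, st, _ => st.2
  | fuel+1, st, i =>
    if i < st.2.length then
      pvLoopFlat graph fuel
        ((PySem.List.pyGetD graph (st.2.getD i (0, 0)).1 []).foldl
          (pvLabInner (st.2.getD i (0, 0)).2) st) (i+1)
    else st.2

def my_find_vertex_by_degree_alt (graph : List (List Int)) (s : Int) (degree : Int) : List Int :=
  if graph.length ≤ 1 then []
  else if degree = 0 then [s]
  else
    ((pvLoopFlat graph graph.length (PySem.Set.ofList [s], [(s, 0)]) 0).filter
      (fun p => p.2 == degree)).map (fun p => p.1)

-- ===== PRECONDITION & SPEC =====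
-- pvLevels is the number of BFS levels from s — the eccentricity of s plus one, an intrinsic
-- quantity of (graph, s) with no closed form; it is stated by the textbook frontier iteration
-- F_{k+1} = fresh vertices of N(F_k) (not a copy of either port) and serves only to bound
-- `degree` in Pre_
def pvNextInner (st : List Int × List Int) (j : Int) : List Int × List Int :=
  if st.2.contains j then st else (st.1 ++ [j], st.2 ++ [j])

def pvStep (graph : List (List Int)) (q seen : List Int) : List Int × List Int :=
  (q.flatMap (fun v => PySem.List.pyGetD graph v [])).foldl pvNextInner ([], seen)

def pvLevels (graph : List (List Int)) : Nat → List Int → List Int → Nat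
  | 0, _, _ => 0
  | fuel+1, q, seen =>
    if q = [] then 0
    else 1 + pvLevels graph fuel (pvStep graph q seen).1 (pvStep graph q seen).2

-- Pre_ restricts to the natural domain of the task: s and every adjacency entry must be valid
-- vertex indices (outside it A raises IndexError or relies on negative-index wraparound), and the
-- depth must be 0 or at most the BFS level count from s (beyond it, and for negative depth, A
-- returns None, which is not a list).
def Pre_my_find_vertex_by_degree (graph : List (List Int)) (s : Int) (degree : Int) : Prop :=
  graph.length ≤ 1 ∨ degree = 0 ∨
  (0 ≤ s ∧ s < (graph.length : Int) ∧
   (∀ adj ∈ graph, ∀ j ∈ adj, 0 ≤ j ∧ j < (graph.length : Int)) ∧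
   1 ≤ degree ∧ degree ≤ (pvLevels graph graph.length [s] [s] : Int))

instance (graph : List (List Int)) (s : Int) (degree : Int) :
    Decidable (Pre_my_find_vertex_by_degree graph s degree) := by
  unfold Pre_my_find_vertex_by_degree; infer_instance

def pvWitness_my_find_vertex_by_degree : List (List Int) × Int × Int := ([[1], [0]], 0, 1)

def Spec_my_find_vertex_by_degree (graph : List (List Int)) (s : Int) (degree : Int) (out : List Int) : Prop := out = my_find_vertex_by_degree_alt graph s degree
instance (graph : List (List Int)) (s : Int) (degree : Int) (out : List Int) : Decidable (Spec_my_find_vertex_by_degree graph s degree out) := by unfold Spec_my_find_vertex_by_degree; infer_instance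

-- ===== CLAIM (what is proved, stated in full; the proofs are below) =====
def Claim_equal_my_find_vertex_by_degree : Prop := ∀ (graph : List (List Int)) (s : Int) (degree : Int), Dom_my_find_vertex_by_degree graph s degree → Pre_my_find_vertex_by_degree graph s degree → Spec_my_find_vertex_by_degree graph s degree (my_find_vertex_by_degree graph s degree)

-- ===== LEMMAS AND PROOFS =====

-- coupling invariant between A's visited array and the frontier iteration's seen list
def pvInv (graph : List (List Int)) (vis : List Bool) (seen : List Int) : Prop :=
  vis.length = graph.length ∧
  ∀ j : Int, 0 ≤ j → j < (graph.length : Int) →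
    PySem.List.pyGetD vis j false = seen.contains j

def pvValid (graph : List (List Int)) : Prop :=
  ∀ adj ∈ graph, ∀ j ∈ adj, 0 ≤ j ∧ j < (graph.length : Int)

-- proof-side view of the BFS: the list of frontiers after the initial one
def pvTail (graph : List (List Int)) : Nat → List Int → List Int → List (List Int)
  | 0, _, _ => []
  | c+1, q, seen =>
    if q = [] then []
    else (pvStep graph q seen).1 :: pvTail graph c (pvStep graph q seen).1 (pvStep graph q seen).2

-- frontiers of pvTail, each labelled with its distance
def pvLab : List (List Int) → Int → List (Int × Int)
  | [], _ => []
  | L :: Ls, m => L.map (fun v => (v, m)) ++ pvLab Ls (m + 1)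

-- number of flat-loop iterations the run from (q, seen) still needs
def pvNeed (graph : List (List Int)) : Nat → List Int → List Int → Nat
  | 0, _, _ => 0
  | c+1, q, seen =>
    if q = [] then 0
    else q.length + pvNeed graph c (pvStep graph q seen).1 (pvStep graph q seen).2

-- the frontier iteration empties within c rounds
def pvDone (graph : List (List Int)) : Nat → List Int → List Int → Prop
  | 0, q, _ => q = []
  | c+1, q, seen => q = [] ∨ pvDone graph c (pvStep graph q seen).1 (pvStep graph q seen).2

theorem pvAdj_valid (graph : List (List Int)) (h : pvValid graph) (v : Int) :
    ∀ j ∈ PySem.List.pyGetD graph v [], 0 ≤ j ∧ j < (graph.length : Int) := by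
  intro j hj
  unfold PySem.List.pyGetD at hj
  cases hv : PySem.List.pyGet? graph v with
  | none => rw [hv] at hj; simp at hj
  | some l =>
    rw [hv] at hj; simp at hj
    exact h l (PySem.List.mem_of_pyGet?_eq_some _ hv) j hj

theorem pvInvStep (graph : List (List Int)) (vis : List Bool) (seen : List Int) (j : Int)
    (hj0 : 0 ≤ j) (hjn : j < (graph.length : Int)) (hInv : pvInv graph vis seen) :
    pvInv graph (PySem.List.pySetD vis j true) (seen ++ [j]) := by
  obtain ⟨hlen, hmem⟩ := hInv
  refine ⟨by rw [PySem.List.length_pySetD, hlen], ?_⟩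
  intro k hk0 hkn
  rw [PySem.List.pySetD_of_nonneg vis true hj0]
  have hkl : k < ((vis.set j.toNat true).length : Int) := by simp [hlen]; omega
  rw [PySem.List.pyGetD_eq_getElem _ false hk0 hkl]
  have hget : (vis.set j.toNat true)[k.toNat] = ((vis.set j.toNat true)[k.toNat]?).getD false := by
    rw [List.getElem?_eq_getElem]; rfl
  rw [hget, List.getElem?_set]
  by_cases hkj : k = j
  · subst hkj
    simp [show k.toNat < vis.length by omega]
  · have hne : ¬ j.toNat = k.toNat := by omega
    simp only [if_neg hne]
    have : PySem.List.pyGetD vis k false = vis[k.toNat]'(by omega) :=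
      PySem.List.pyGetD_eq_getElem _ false hk0 (by omega)
    rw [List.getElem?_eq_getElem (by omega : k.toNat < vis.length)]
    simp only [Option.getD_some]
    rw [← this, hmem k hk0 hkn]
    simp [List.contains_eq_mem, List.mem_append]
    intro hc; omega

theorem pvCoupleFold (graph : List (List Int)) (vertex : Int) (L : List Int)
    (hL : ∀ j ∈ L, 0 ≤ j ∧ j < (graph.length : Int)) :
    ∀ (nxt : List Int) (vis : List Bool) (prev : List (Option Int)) (seen : List Int),
      pvInv graph vis seen →
      (L.foldl (pvInnerA vertex) (nxt, vis, prev)).1 = (L.foldl pvNextInner (nxt, seen)).1 ∧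
      pvInv graph (L.foldl (pvInnerA vertex) (nxt, vis, prev)).2.1
        (L.foldl pvNextInner (nxt, seen)).2 := by
  induction L with
  | nil => intro nxt vis prev seen hInv; exact ⟨rfl, hInv⟩
  | cons j L ih =>
    intro nxt vis prev seen hInv
    obtain ⟨hj0, hjn⟩ := hL j (List.mem_cons_self ..)
    have hL' : ∀ x ∈ L, 0 ≤ x ∧ x < (graph.length : Int) :=
      fun x hx => hL x (List.mem_cons_of_mem _ hx)
    have htest : PySem.List.pyGetD vis j false = seen.contains j := hInv.2 j hj0 hjn
    simp only [List.foldl_cons]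
    by_cases h : seen.contains j = true
    · have hm : j ∈ seen := List.contains_iff_mem.mp h
      have ha : pvInnerA vertex (nxt, vis, prev) j = (nxt, vis, prev) := by
        unfold pvInnerA; rw [htest]; simp [hm]
      have hb : pvNextInner (nxt, seen) j = (nxt, seen) := by unfold pvNextInner; simp [hm]
      rw [ha, hb]
      exact ih hL' nxt vis prev seen hInv
    · have hm : j ∉ seen := fun hx => h (List.contains_iff_mem.mpr hx)
      have ha : pvInnerA vertex (nxt, vis, prev) j =
          (nxt ++ [j], PySem.List.pySetD vis j true, PySem.List.pySetD prev j (some vertex)) := by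
        unfold pvInnerA; rw [htest]; simp [hm]
      have hb : pvNextInner (nxt, seen) j = (nxt ++ [j], seen ++ [j]) := by
        unfold pvNextInner; simp [hm]
      rw [ha, hb]
      exact ih hL' _ _ _ _ (pvInvStep graph vis seen j hj0 hjn hInv)

theorem pvCoupleStep (graph : List (List Int)) (hg : pvValid graph) (q : List Int) :
    ∀ (nxt : List Int) (vis : List Bool) (prev : List (Option Int)) (seen : List Int),
      pvInv graph vis seen →
      (q.foldl (pvStepA graph) (nxt, vis, prev)).1 =
        ((q.flatMap (fun v => PySem.List.pyGetD graph v [])).foldl pvNextInner (nxt, seen)).1 ∧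
      pvInv graph (q.foldl (pvStepA graph) (nxt, vis, prev)).2.1
        ((q.flatMap (fun v => PySem.List.pyGetD graph v [])).foldl pvNextInner (nxt, seen)).2 := by
  induction q with
  | nil => intro nxt vis prev seen hInv; exact ⟨rfl, hInv⟩
  | cons v q ih =>
    intro nxt vis prev seen hInv
    simp only [List.flatMap_cons, List.foldl_append, List.foldl_cons]
    obtain ⟨h1, h2⟩ :=
      pvCoupleFold graph v (PySem.List.pyGetD graph v []) (pvAdj_valid graph hg v)
        nxt vis prev seen hInv
    have hs : pvStepA graph (nxt, vis, prev) v
        = (PySem.List.pyGetD graph v []).foldl (pvInnerA v) (nxt, vis, prev) := rfl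
    rw [hs]
    have hba : (PySem.List.pyGetD graph v []).foldl pvNextInner (nxt, seen)
        = (((PySem.List.pyGetD graph v []).foldl (pvInnerA v) (nxt, vis, prev)).1,
           ((PySem.List.pyGetD graph v []).foldl pvNextInner (nxt, seen)).2) :=
      Prod.ext h1.symm rfl
    rw [hba]
    exact ih _ _ _ _ h2

theorem pvTail_length (graph : List (List Int)) :
    ∀ (c : Nat) (q seen : List Int), (pvTail graph c q seen).length = pvLevels graph c q seen := by
  intro c
  induction c with
  | zero => intro q seen; rfl
  | succ c ih =>
    intro q seen
    unfold pvTail pvLevels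
    by_cases hq : q = [] <;> simp [hq, ih]
    omega

theorem pvLevels_le_fuel (graph : List (List Int)) :
    ∀ (c : Nat) (q seen : List Int), pvLevels graph c q seen ≤ c := by
  intro c
  induction c with
  | zero => intro q seen; exact le_refl _
  | succ c ih =>
    intro q seen
    unfold pvLevels
    by_cases hq : q = [] <;> simp [hq]
    have := ih (pvStep graph q seen).1 (pvStep graph q seen).2
    omega

theorem pvMain (graph : List (List Int)) (hg : pvValid graph) :
    ∀ (c fa : Nat) (q : List Int) (vis : List Bool) (prev : List (Option Int)) (seen : List Int)
      (d : Int), pvInv graph vis seen → 1 ≤ d → d ≤ (pvLevels graph c q seen : Int) →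
      d.toNat ≤ fa →
      pvLoopA graph fa q vis prev d = (pvTail graph c q seen).getD (d.toNat - 1) [] := by
  intro c
  induction c with
  | zero =>
    intro fa q vis prev seen d _ hd1 hdle _
    simp [pvLevels] at hdle; omega
  | succ c ih =>
    intro fa q vis prev seen d hInv hd1 hdle hfa
    by_cases hq : q = []
    · rw [hq] at hdle; simp [pvLevels] at hdle; omega
    have hdle' : d ≤ 1 + (pvLevels graph c (pvStep graph q seen).1 (pvStep graph q seen).2 : Int) := by
      unfold pvLevels at hdle
      rw [if_neg hq] at hdle
      push_cast at hdle ⊢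
      omega
    obtain ⟨fa, rfl⟩ : ∃ fa', fa = fa' + 1 := ⟨fa - 1, by omega⟩
    obtain ⟨h1, h2⟩ := pvCoupleStep graph hg q [] vis prev seen hInv
    have hstep : (q.flatMap (fun v => PySem.List.pyGetD graph v [])).foldl pvNextInner ([], seen)
        = pvStep graph q seen := rfl
    rw [hstep] at h1 h2
    show (if q = [] then [] else _) = _
    rw [if_neg hq]
    show (if d - 1 = 0 then (q.foldl (pvStepA graph) ([], vis, prev)).1
          else pvLoopA graph fa (q.foldl (pvStepA graph) ([], vis, prev)).1
            (q.foldl (pvStepA graph) ([], vis, prev)).2.1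
            (q.foldl (pvStepA graph) ([], vis, prev)).2.2 (d - 1)) = _
    have htail : pvTail graph (c+1) q seen
        = (pvStep graph q seen).1 :: pvTail graph c (pvStep graph q seen).1 (pvStep graph q seen).2 := by
      rw [pvTail]; rw [if_neg hq]
    rw [htail]
    by_cases hd : d - 1 = 0
    · rw [if_pos hd]
      have : d.toNat - 1 = 0 := by omega
      rw [this, List.getD_cons_zero]
      exact h1
    · rw [if_neg hd]
      have hrec := ih fa (pvStep graph q seen).1
        (q.foldl (pvStepA graph) ([], vis, prev)).2.1
        (q.foldl (pvStepA graph) ([], vis, prev)).2.2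
        (pvStep graph q seen).2 (d - 1) h2 (by omega) (by omega) (by omega)
      rw [h1, hrec]
      have hidx : d.toNat - 1 = ((d - 1).toNat - 1) + 1 := by omega
      rw [hidx, List.getD_cons_succ]

theorem pvInv_init (graph : List (List Int)) (s : Int) (hs0 : 0 ≤ s)
    (hsn : s < (graph.length : Int)) :
    pvInv graph (PySem.List.pySetD (List.replicate graph.length false) s true) [s] := by
  refine ⟨by rw [PySem.List.length_pySetD, List.length_replicate], ?_⟩
  intro k hk0 hkn
  rw [PySem.List.pySetD_of_nonneg _ true hs0]
  have hkl : k < (((List.replicate graph.length false).set s.toNat true).length : Int) := by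
    simp; omega
  rw [PySem.List.pyGetD_eq_getElem _ false hk0 hkl]
  have hget : ((List.replicate graph.length false).set s.toNat true)[k.toNat]
      = (((List.replicate graph.length false).set s.toNat true)[k.toNat]?).getD false := by
    rw [List.getElem?_eq_getElem]; rfl
  rw [hget, List.getElem?_set]
  by_cases hks : k = s
  · subst hks
    simp [show k.toNat < graph.length by omega, List.contains_eq_mem]
  · have hne : ¬ s.toNat = k.toNat := by omega
    simp only [if_neg hne]
    rw [List.getElem?_eq_getElem (by simp; omega : k.toNat < (List.replicate graph.length false).length)]
    simp [List.contains_eq_mem]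
    omega

-- ===== B-side lemmas =====

-- i has reached the end of labeled: the flat loop stops
theorem pvStop (graph : List (List Int)) :
    ∀ (fuel : Nat) (S : PySem.Set Int) (lab : List (Int × Int)),
      pvLoopFlat graph fuel (S, lab) lab.length = lab := by
  intro fuel S lab
  cases fuel with
  | zero => rfl
  | succ n => simp [pvLoopFlat]

theorem pvGetDone (done : List (Int × Int)) (p : Int × Int) (rest : List (Int × Int)) :
    (done ++ p :: rest).getD done.length (0, 0) = p := by
  unfold List.getD
  rw [List.getElem?_append_right (le_refl done.length)]
  simp

-- processing one vertex of level k: the inner fold appends exactly the fresh neighbours,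
-- labelled k+1, and advances the seen set the same way pvNextInner does
theorem pvOneVertex (k : Int) :
    ∀ (adj S acc : List Int) (lab0 : List (Int × Int)),
      adj.foldl (pvLabInner k) (S, lab0 ++ acc.map (fun j => (j, k + 1)))
      = ((adj.foldl pvNextInner (acc, S)).2,
         lab0 ++ ((adj.foldl pvNextInner (acc, S)).1).map (fun j => (j, k + 1))) := by
  intro adj
  induction adj with
  | nil => intro S acc lab0; rfl
  | cons j adj ih =>
    intro S acc lab0
    simp only [List.foldl_cons]
    by_cases h : S.contains j = true
    · have hm : j ∈ S := List.contains_iff_mem.mp h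
      have ha : pvLabInner k (S, lab0 ++ acc.map (fun j => (j, k + 1))) j
          = (S, lab0 ++ acc.map (fun j => (j, k + 1))) := by
        unfold pvLabInner PySem.Set.contains
        simp [hm]
      have hb : pvNextInner (acc, S) j = (acc, S) := by unfold pvNextInner; simp [hm]
      rw [ha, hb]; exact ih S acc lab0
    · have hm : j ∉ S := fun hx => h (List.contains_iff_mem.mpr hx)
      have ha : pvLabInner k (S, lab0 ++ acc.map (fun j => (j, k + 1))) j
          = (S ++ [j], lab0 ++ (acc ++ [j]).map (fun j => (j, k + 1))) := by
        unfold pvLabInner PySem.Set.contains PySem.Set.add PySem.Set.contains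
        simp [hm]
      have hb : pvNextInner (acc, S) j = (acc ++ [j], S ++ [j]) := by
        unfold pvNextInner; simp [hm]
      rw [ha, hb]; exact ih (S ++ [j]) (acc ++ [j]) lab0

-- processing a whole level k: |R| flat-loop iterations consume R and append the next frontier
theorem pvOneLevel (graph : List (List Int)) (k : Int) :
    ∀ (R : List Int) (fuel : Nat) (S acc : List Int) (done : List (Int × Int)),
      pvLoopFlat graph (R.length + fuel)
        (S, done ++ R.map (fun v => (v, k)) ++ acc.map (fun j => (j, k + 1))) done.length
      = pvLoopFlat graph fuel
          (((R.flatMap (fun v => PySem.List.pyGetD graph v [])).foldl pvNextInner (acc, S)).2,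
           done ++ R.map (fun v => (v, k)) ++
             (((R.flatMap (fun v => PySem.List.pyGetD graph v [])).foldl pvNextInner (acc, S)).1).map
               (fun j => (j, k + 1)))
          (done.length + R.length) := by
  intro R
  induction R with
  | nil => intro fuel S acc done; simp
  | cons v R ih =>
    intro fuel S acc done
    have hlen : (v :: R).length + fuel = (R.length + fuel) + 1 := by simp; omega
    rw [hlen]
    have hguard : done.length <
        (done ++ (v :: R).map (fun v => (v, k)) ++ acc.map (fun j => (j, k + 1))).length := by
      simp
    rw [pvLoopFlat]
    rw [if_pos hguard]
    have hget : (done ++ (v :: R).map (fun v => (v, k)) ++ acc.map (fun j => (j, k + 1))).getD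
        done.length (0, 0) = (v, k) := by
      rw [List.append_assoc, List.map_cons, List.cons_append]
      exact pvGetDone done (v, k) _
    simp only [hget]
    have hfold := pvOneVertex k (PySem.List.pyGetD graph v []) S acc
      (done ++ (v :: R).map (fun v => (v, k)))
    rw [List.append_assoc] at hfold ⊢
    rw [hfold]
    have hre : done ++ (v :: R).map (fun v => (v, k))
        = (done ++ [(v, k)]) ++ R.map (fun v => (v, k)) := by simp
    rw [hre]
    have hd1 : done.length + 1 = (done ++ [(v, k)]).length := by simp
    rw [hd1]
    rw [ih fuel ((PySem.List.pyGetD graph v []).foldl pvNextInner (acc, S)).2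
      ((PySem.List.pyGetD graph v []).foldl pvNextInner (acc, S)).1 (done ++ [(v, k)])]
    have hF : (R.flatMap (fun v => PySem.List.pyGetD graph v [])).foldl pvNextInner
        (((PySem.List.pyGetD graph v []).foldl pvNextInner (acc, S)).1,
         ((PySem.List.pyGetD graph v []).foldl pvNextInner (acc, S)).2)
        = ((v :: R).flatMap (fun v => PySem.List.pyGetD graph v [])).foldl pvNextInner (acc, S) := by
      rw [List.flatMap_cons, List.foldl_append]
    rw [hF]
    have hidx : (done ++ [(v, k)]).length + R.length = done.length + (v :: R).length := by
      simp; omega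
    rw [hidx]

-- the whole flat run, coupled to the frontier iteration: labeled ends as the labelled levels
theorem pvAllLevels (graph : List (List Int)) :
    ∀ (c : Nat) (Q S : List Int) (done : List (Int × Int)) (k : Int) (fuel : Nat),
      pvDone graph c Q S → pvNeed graph c Q S ≤ fuel →
      pvLoopFlat graph fuel (S, done ++ Q.map (fun v => (v, k))) done.length
      = done ++ Q.map (fun v => (v, k)) ++ pvLab (pvTail graph c Q S) (k + 1) := by
  intro c
  induction c with
  | zero =>
    intro Q S done k fuel hdone _
    have hQ : Q = [] := hdone
    subst hQ
    simp [pvTail, pvLab, pvStop]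
  | succ c ih =>
    intro Q S done k fuel hdone hneed
    by_cases hQ : Q = []
    · subst hQ
      simp [pvTail, pvLab, pvStop]
    · have hdone' : pvDone graph c (pvStep graph Q S).1 (pvStep graph Q S).2 := by
        cases hdone with
        | inl h => exact absurd h hQ
        | inr h => exact h
      have hneed' : Q.length + pvNeed graph c (pvStep graph Q S).1 (pvStep graph Q S).2 ≤ fuel := by
        unfold pvNeed at hneed
        rw [if_neg hQ] at hneed
        exact hneed
      obtain ⟨fuel', rfl⟩ : ∃ f, fuel = Q.length + f :=
        ⟨fuel - Q.length, by omega⟩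
      have h1 := pvOneLevel graph k Q fuel' S [] done
      simp only [List.map_nil, List.append_nil] at h1
      have hstep : (Q.flatMap (fun v => PySem.List.pyGetD graph v [])).foldl pvNextInner ([], S)
          = pvStep graph Q S := rfl
      rw [hstep] at h1
      rw [h1]
      have hre : done ++ Q.map (fun v => (v, k)) ++
          ((pvStep graph Q S).1).map (fun j => (j, k + 1))
          = (done ++ Q.map (fun v => (v, k))) ++ ((pvStep graph Q S).1).map (fun v => (v, k + 1)) := by
        simp
      rw [hre]
      have hlen2 : done.length + Q.length = (done ++ Q.map (fun v => (v, k))).length := by simp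
      rw [hlen2]
      rw [ih (pvStep graph Q S).1 (pvStep graph Q S).2 (done ++ Q.map (fun v => (v, k))) (k + 1)
        fuel' hdone' (by omega)]
      have htail : pvTail graph (c+1) Q S
          = (pvStep graph Q S).1 :: pvTail graph c (pvStep graph Q S).1 (pvStep graph Q S).2 := by
        rw [pvTail]; rw [if_neg hQ]
      rw [htail]
      simp [pvLab]

-- a duplicate-free list of valid vertex indices has at most graph.length elements
theorem pvNodupLen (S : List Int) (n : Nat) (hnd : S.Nodup)
    (hr : ∀ x ∈ S, 0 ≤ x ∧ x < (n : Int)) : S.length ≤ n := by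
  have hcard : S.length = S.toFinset.card := (List.toFinset_card_of_nodup hnd).symm
  have hsub : S.toFinset ⊆ Finset.Ico (0 : Int) n := by
    intro x hx
    rw [List.mem_toFinset] at hx
    obtain ⟨h1, h2⟩ := hr x hx
    rw [Finset.mem_Ico]
    exact ⟨h1, h2⟩
  have := Finset.card_le_card hsub
  rw [Int.card_Ico] at this
  omega

-- the frontier fold appends the same fresh block to both components
theorem pvFoldDelta :
    ∀ (L acc S : List Int), ∃ t : List Int,
      L.foldl pvNextInner (acc, S) = (acc ++ t, S ++ t) ∧ t.Nodup ∧
      ∀ x ∈ t, x ∉ S ∧ x ∈ L := by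
  intro L
  induction L with
  | nil =>
    intro acc S
    refine ⟨[], by simp, List.nodup_nil, ?_⟩
    intro x hx
    simp at hx
  | cons j L ih =>
    intro acc S
    simp only [List.foldl_cons]
    by_cases h : S.contains j = true
    · have hm : j ∈ S := List.contains_iff_mem.mp h
      have hb : pvNextInner (acc, S) j = (acc, S) := by unfold pvNextInner; simp [hm]
      rw [hb]
      obtain ⟨t, ht, hnd, hp⟩ := ih acc S
      exact ⟨t, ht, hnd, fun x hx => ⟨(hp x hx).1, List.mem_cons_of_mem _ (hp x hx).2⟩⟩
    · have hm : j ∉ S := fun hx => h (List.contains_iff_mem.mpr hx)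
      have hb : pvNextInner (acc, S) j = (acc ++ [j], S ++ [j]) := by unfold pvNextInner; simp [hm]
      rw [hb]
      obtain ⟨t, ht, hnd, hp⟩ := ih (acc ++ [j]) (S ++ [j])
      refine ⟨j :: t, ?_, ?_, ?_⟩
      · rw [ht]; simp
      · refine List.nodup_cons.mpr ⟨fun hx => ?_, hnd⟩
        have := (hp j hx).1
        simp at this
      · intro x hx
        rcases List.mem_cons.mp hx with rfl | hx
        · exact ⟨hm, List.mem_cons_self ..⟩
        · obtain ⟨h1, h2⟩ := hp x hx
          simp at h1
          exact ⟨h1.1, List.mem_cons_of_mem _ h2⟩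

theorem pvStepDelta (graph : List (List Int)) (hg : pvValid graph) (Q S : List Int) :
    (pvStep graph Q S).2 = S ++ (pvStep graph Q S).1 ∧ (pvStep graph Q S).1.Nodup ∧
      ∀ x ∈ (pvStep graph Q S).1, x ∉ S ∧ 0 ≤ x ∧ x < (graph.length : Int) := by
  obtain ⟨t, ht, hnd, hp⟩ := pvFoldDelta (Q.flatMap (fun v => PySem.List.pyGetD graph v [])) [] S
  have h2 : (pvStep graph Q S).1 = t := by unfold pvStep; rw [ht]; simp
  have h3 : (pvStep graph Q S).2 = S ++ t := by unfold pvStep; rw [ht]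
  refine ⟨by rw [h2, h3], by rw [h2]; exact hnd, ?_⟩
  intro x hx
  rw [h2] at hx
  refine ⟨(hp x hx).1, ?_⟩
  have hmem := (hp x hx).2
  rw [List.mem_flatMap] at hmem
  obtain ⟨v, _, hxv⟩ := hmem
  exact pvAdj_valid graph hg v x hxv

theorem pvDone_holds (graph : List (List Int)) (hg : pvValid graph) :
    ∀ (c : Nat) (Q S : List Int), S.Nodup → (∀ x ∈ S, 0 ≤ x ∧ x < (graph.length : Int)) →
      (∀ x ∈ Q, x ∈ S) → graph.length + Q.length ≤ c + S.length → pvDone graph c Q S := by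
  intro c
  induction c with
  | zero =>
    intro Q S hnd hr _ harith
    cases Q with
    | nil => rfl
    | cons q Q =>
      have := pvNodupLen S graph.length hnd hr
      simp at harith
      omega
  | succ c ih =>
    intro Q S hnd hr hQS harith
    by_cases hQ : Q = []
    · exact Or.inl hQ
    · refine Or.inr ?_
      obtain ⟨heq, hnd', hp⟩ := pvStepDelta graph hg Q S
      rw [heq]
      refine ih _ _ ?_ ?_ ?_ ?_
      · refine List.Nodup.append hnd hnd' ?_
        intro a ha hat
        exact (hp a hat).1 ha
      · intro x hx
        rcases List.mem_append.mp hx with h | h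
        · exact hr x h
        · exact (hp x h).2
      · intro x hx
        exact List.mem_append.mpr (Or.inr hx)
      · have hQ1 : 1 ≤ Q.length := by
          cases Q with
          | nil => exact absurd rfl hQ
          | cons _ _ => simp
        simp only [List.length_append]
        omega

theorem pvNeed_bound (graph : List (List Int)) (hg : pvValid graph) :
    ∀ (c : Nat) (Q S : List Int), S.Nodup → (∀ x ∈ S, 0 ≤ x ∧ x < (graph.length : Int)) →
      pvNeed graph c Q S + S.length ≤ graph.length + Q.length := by
  intro c
  induction c with
  | zero =>
    intro Q S hnd hr
    have := pvNodupLen S graph.length hnd hr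
    simp [pvNeed]
    omega
  | succ c ih =>
    intro Q S hnd hr
    by_cases hQ : Q = []
    · unfold pvNeed
      rw [if_pos hQ]
      have := pvNodupLen S graph.length hnd hr
      omega
    · unfold pvNeed
      rw [if_neg hQ]
      obtain ⟨heq, hnd', hp⟩ := pvStepDelta graph hg Q S
      have hih := ih (pvStep graph Q S).1 (pvStep graph Q S).2
        (by
          rw [heq]
          refine List.Nodup.append hnd hnd' ?_
          intro a ha hat
          exact (hp a hat).1 ha)
        (by
          rw [heq]
          intro x hx
          rcases List.mem_append.mp hx with h | h
          · exact hr x h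
          · exact (hp x h).2)
      rw [heq] at hih ⊢
      simp only [List.length_append] at hih
      omega

-- every label in pvLab Ls m is at least m
theorem pvLab_ge : ∀ (Ls : List (List Int)) (m : Int) (p : Int × Int), p ∈ pvLab Ls m → m ≤ p.2 := by
  intro Ls
  induction Ls with
  | nil => intro m p hp; simp [pvLab] at hp
  | cons L Ls ih =>
    intro m p hp
    rcases List.mem_append.mp hp with h | h
    · obtain ⟨v, _, rfl⟩ := List.mem_map.mp h
      exact le_refl m
    · have := ih (m + 1) p h
      omega

-- selecting one label from the labelled levels gives exactly that level
theorem pvFilterLab :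
    ∀ (Ls : List (List Int)) (m deg : Int), m ≤ deg →
      ((pvLab Ls m).filter (fun p => p.2 == deg)).map (fun p => p.1)
      = if deg < m + (Ls.length : Int) then Ls.getD (deg - m).toNat [] else [] := by
  intro Ls
  induction Ls with
  | nil =>
    intro m deg hm
    simp [pvLab]
  | cons L Ls ih =>
    intro m deg hm
    simp only [pvLab, List.filter_append, List.map_append]
    by_cases hd : deg = m
    · subst hd
      have h1 : (L.map (fun v => (v, deg))).filter (fun p => p.2 == deg)
          = L.map (fun v => (v, deg)) := by
        apply List.filter_eq_self.mpr
        intro p hp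
        obtain ⟨v, _, rfl⟩ := List.mem_map.mp hp
        simp
      have h2 : (pvLab Ls (deg + 1)).filter (fun p => p.2 == deg) = [] := by
        apply List.filter_eq_nil_iff.mpr
        intro p hp
        have hge := pvLab_ge Ls (deg + 1) p hp
        simp only [beq_iff_eq]
        omega
      rw [h1, h2]
      simp only [List.map_nil, List.append_nil]
      have hcond : deg < deg + ((L :: Ls).length : Int) := by
        simp only [List.length_cons]
        push_cast
        omega
      rw [if_pos hcond]
      have hz : (deg - deg).toNat = 0 := by omega
      rw [hz, List.getD_cons_zero, List.map_map]
      have hcomp : ((fun p : Int × Int => p.1) ∘ fun v : Int => (v, deg)) = id := rfl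
      rw [hcomp, List.map_id]
    · have h1 : (L.map (fun v => (v, m))).filter (fun p => p.2 == deg) = [] := by
        apply List.filter_eq_nil_iff.mpr
        intro p hp
        obtain ⟨v, _, rfl⟩ := List.mem_map.mp hp
        simp only [beq_iff_eq]
        omega
      rw [h1]
      simp only [List.map_nil, List.nil_append]
      rw [ih (m + 1) deg (by omega)]
      by_cases hlt : deg < (m + 1) + (Ls.length : Int)
      · rw [if_pos hlt,
          if_pos (by simp only [List.length_cons]; push_cast; omega : deg < m + ((L :: Ls).length : Int))]
        have hidx : (deg - m).toNat = (deg - (m + 1)).toNat + 1 := by omega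
        rw [hidx, List.getD_cons_succ]
      · rw [if_neg hlt,
          if_neg (by simp only [List.length_cons]; push_cast; omega : ¬ deg < m + ((L :: Ls).length : Int))]

-- ===== VERDICT (by name: the statement is the Claim_ definition above) =====
theorem my_find_vertex_by_degree_spec : Claim_equal_my_find_vertex_by_degree := by
  intro graph s degree _ hPre
  unfold Spec_my_find_vertex_by_degree my_find_vertex_by_degree my_find_vertex_by_degree_alt
  by_cases h1 : graph.length ≤ 1
  · simp [h1]
  rw [if_neg h1, if_neg h1]
  by_cases h0 : degree = 0
  · simp [h0]
  rw [if_neg h0, if_neg h0]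
  rcases hPre with h | h | ⟨hs0, hsn, hvalid, hd1, hdle⟩
  · exact absurd h h1
  · exact absurd h h0
  -- A side
  set T := pvTail graph graph.length [s] [s] with hT
  have hTlen : T.length = pvLevels graph graph.length [s] [s] := pvTail_length graph _ _ _
  have hfa : degree.toNat ≤ graph.length + 1 := by
    have := pvLevels_le_fuel graph graph.length [s] [s]
    omega
  have hA : pvLoopA graph (graph.length + 1) [s]
      (PySem.List.pySetD (List.replicate graph.length false) s true)
      (List.replicate graph.length none) degree = T.getD (degree.toNat - 1) [] :=
    pvMain graph hvalid graph.length (graph.length + 1) [s] _ _ [s] degree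
      (pvInv_init graph s hs0 hsn) hd1 hdle hfa
  rw [hA]
  -- B side
  have hofl : PySem.Set.ofList [s] = [s] := rfl
  have hSr : ∀ x ∈ ([s] : List Int), 0 ≤ x ∧ x < (graph.length : Int) := by
    intro x hx
    simp at hx
    subst hx
    exact ⟨hs0, hsn⟩
  have hdone : pvDone graph graph.length [s] [s] :=
    pvDone_holds graph hvalid graph.length [s] [s] (List.nodup_singleton s) hSr
      (fun x hx => hx) (by simp)
  have hneed : pvNeed graph graph.length [s] [s] ≤ graph.length := by
    have := pvNeed_bound graph hvalid graph.length [s] [s] (List.nodup_singleton s) hSr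
    simp at this
    omega
  have hrun := pvAllLevels graph graph.length [s] [s] [] 0 graph.length hdone hneed
  simp only [List.nil_append, List.map_cons, List.map_nil] at hrun
  have hinit : pvLoopFlat graph graph.length (PySem.Set.ofList [s], [(s, 0)]) 0
      = [(s, 0)] ++ pvLab T (0 + 1) := by
    rw [hofl]
    have h0len : (0 : Nat) = ([] : List (Int × Int)).length := rfl
    rw [h0len]
    have : ([] : List (Int × Int)) ++ [s].map (fun v => (v, (0 : Int))) = [(s, 0)] := by simp
    rw [← this]
    rw [pvAllLevels graph graph.length [s] [s] [] 0 graph.length hdone hneed]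
  rw [hinit]
  rw [List.filter_append, List.map_append]
  have hhead : ([((s : Int), (0 : Int))].filter (fun p => p.2 == degree)) = [] := by
    simp only [List.filter_cons, List.filter_nil, beq_iff_eq]
    have : ¬ ((0 : Int) = degree) := by omega
    simp [this]
  rw [hhead]
  simp only [List.map_nil, List.nil_append]
  have h01 : (0 : Int) + 1 = 1 := by norm_num
  rw [h01]
  rw [pvFilterLab T 1 degree hd1]
  have hcond : degree < 1 + (T.length : Int) := by
    rw [hTlen]
    omega
  rw [if_pos hcond]
  have hidx : (degree - 1).toNat = degree.toNat - 1 := by omega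
  rw [hidx]
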